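-- pv_equiv track=rewrite | github.com/AkshayWazir/LeetCodeBackup | account merge.py | merge_account
-- ===== SOURCE A (Python) =====
-- import math
--
-- def merge_account(accounts):
--     mails, name = dict(), dict()
--     for i in range(len(accounts)):
--         for j in range(1, len(accounts[i])):
--             mails[accounts[i][j]] = min(mails.get(accounts[i][j], math.inf), i)
--         name[i] = accounts[i][0]
--     for a in range(4):
--         for i in range(len(accounts)):
--             temp_min = math.inf
--             for j in range(1, len(accounts[i])):
--                 temp_min = min(mails.get(accounts[i][j]), temp_min)
--             for j in range(1, len(accounts[i])):
--                 mails[accounts[i][j]] = temp_min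
--     res = [[name[i]] + [j[0] for j in mails.items() if j[1] == i] for i in range(len(accounts))]
--     i = 0
--     while i < len(res):
--         if len(res[i]) == 1:
--             res.pop(i)
--         else:
--             res[i][1:] = sorted(res[i][1:])
--             i += 1
--     return res
-- ===== SOURCE B (Python) =====
-- import math
--
-- def merge_account(accounts):
--     # Same labelling (min-index + 4 propagation rounds) but the result is built in
--     # ONE pass over the label dict (grouping emails by label) instead of rescanning
--     # all items once per account, and singletons are dropped by a filter, not a
--     # while/pop loop.
--     mails_of = [acc[1:] for acc in accounts]
--     label = {}
--     for i, mails in enumerate(mails_of):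
--         for m in mails:
--             if m not in label or i < label[m]:
--                 label[m] = i
--     for _ in range(4):
--         for i, mails in enumerate(mails_of):
--             t = math.inf
--             for m in mails:
--                 t = min(label.get(m, math.inf), t)
--             for m in mails:
--                 label[m] = t
--     groups = {}
--     for m, i in label.items():
--         groups.setdefault(i, []).append(m)
--     res = []
--     for i, acc in enumerate(accounts):
--         if i in groups:
--             res.append([acc[0]] + sorted(groups[i]))
--     return res
-- ===== Notes on version B (the rewrite author's own statement) =====
-- stated objective: faster
-- what changed: The result is built in one pass that groups emails by their final label into a dict of lists (instead of rescanning every dict item once per account), and singleton rows are dropped by a filter instead of a while/pop loop; per-account email lists are sliced once up front.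
-- crash fix: A raises IndexError on any input containing an empty account list; B returns the merge of the remaining accounts. — e.g. on merge_account([["ann", "a@x.com"], []]): A raises IndexError, B returns [["ann", "a@x.com"]]
import Mathlib
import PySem

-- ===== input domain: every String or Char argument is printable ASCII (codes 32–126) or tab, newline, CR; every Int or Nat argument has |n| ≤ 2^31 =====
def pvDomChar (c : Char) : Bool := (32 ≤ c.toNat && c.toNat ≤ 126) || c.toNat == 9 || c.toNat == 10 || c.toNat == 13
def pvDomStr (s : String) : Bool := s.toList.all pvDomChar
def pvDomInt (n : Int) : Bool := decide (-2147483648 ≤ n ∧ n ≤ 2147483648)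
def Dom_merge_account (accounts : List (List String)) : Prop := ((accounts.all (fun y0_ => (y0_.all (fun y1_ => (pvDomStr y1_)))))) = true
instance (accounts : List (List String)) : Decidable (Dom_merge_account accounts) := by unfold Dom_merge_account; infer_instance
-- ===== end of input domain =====

-- B builds the result in ONE pass over the label dict (grouping emails by label) instead of
-- rescanning all dict items once per account, and drops singleton rows by a filter rather
-- than a while/pop loop (objective: faster).

-- math.inf is used by both Pythons only as a "minimum not yet seen" sentinel that is never
-- stored in the dict or returned: it is modelled exactly by `Option Int` with `none` = +inf.
-- pvMinOpt a b = min of two such extended values; pvMin2 a i = min(a or inf, i) : Int;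
-- pvStore d m t = `d[m] = t` for an extended value (the `none` branch is unreachable in both
-- Pythons: t is +inf only when the account has no emails, and then no store happens).
def pvMinOpt (a : Option Int) (b : Option Int) : Option Int :=
  match a, b with
  | none, b => b
  | some v, none => some v
  | some v, some w => some (min v w)

def pvMin2 (a : Option Int) (i : Int) : Int :=
  match a with
  | none => i
  | some v => min v i

def pvStore (d : PySem.Dict String Int) (m : String) (t : Option Int) : PySem.Dict String Int :=
  match t with
  | some t => d.insert m t
  | none => d

-- ===== PORT A =====
-- A's while-loop over res with pop(i): pop = drop the row and keep the index, else sort the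
-- tail in place and advance — structurally, a recursion over the remaining rows
def pvPrune : List (List String) → List (List String)
  | [] => []
  | r :: rest =>
    if r.length == 1 then pvPrune rest
    else (PySem.List.slice r none (some 1) ++ PySem.List.sorted (PySem.List.slice r (some 1) none) (fun x => x) false) :: pvPrune rest

def merge_account (accounts : List (List String)) : List (List String) :=
  let n : Int := (accounts.length : Int)
  -- for i in range(len(accounts)): mails[...] = min(mails.get(..., inf), i); name[i] = accounts[i][0]
  let st : PySem.Dict String Int × PySem.Dict Int String :=
    (PySem.List.pyRange 0 n 1).foldl (fun st i =>
      let acc := PySem.List.pyGetD accounts i []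
      ((PySem.List.pyRange 1 (acc.length : Int) 1).foldl (fun d j =>
          let m := PySem.List.pyGetD acc j ""
          d.insert m (pvMin2 (d.get? m) i)) st.1,
       st.2.insert i (PySem.List.pyGetD acc 0 ""))) (PySem.Dict.empty, PySem.Dict.empty)
  let name := st.2
  -- for a in range(4): temp_min = inf; temp_min = min(mails.get(...), temp_min); mails[...] = temp_min
  let mails : PySem.Dict String Int :=
    (PySem.List.pyRange 0 4 1).foldl (fun d _ =>
      (PySem.List.pyRange 0 n 1).foldl (fun d i =>
        let acc := PySem.List.pyGetD accounts i []
        let tm : Option Int :=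
          (PySem.List.pyRange 1 (acc.length : Int) 1).foldl (fun t j =>
            pvMinOpt (d.get? (PySem.List.pyGetD acc j "")) t) none
        (PySem.List.pyRange 1 (acc.length : Int) 1).foldl (fun d j =>
          pvStore d (PySem.List.pyGetD acc j "") tm) d) d) st.1
  -- res = [[name[i]] + [j[0] for j in mails.items() if j[1] == i] for i in range(len(accounts))]
  let res : List (List String) :=
    (PySem.List.pyRange 0 n 1).map (fun i =>
      name.getD i "" :: (mails.items.filter (fun p => p.2 == i)).map (fun p => p.1))
  pvPrune res

-- ===== PORT B =====
def merge_account_alt (accounts : List (List String)) : List (List String) :=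
  let mails_of : List (List String) := accounts.map (fun acc => PySem.List.slice acc (some 1) none)
  let label0 : PySem.Dict String Int :=
    (PySem.List.enumerate mails_of).foldl (fun d p =>
      p.2.foldl (fun d m =>
        if !d.contains m || p.1 < d.getD m 0 then d.insert m p.1 else d) d) PySem.Dict.empty
  let label : PySem.Dict String Int :=
    (PySem.List.pyRange 0 4 1).foldl (fun d _ =>
      (PySem.List.enumerate mails_of).foldl (fun d p =>
        let t : Option Int := p.2.foldl (fun t m => pvMinOpt (d.get? m) t) none
        p.2.foldl (fun d m => pvStore d m t) d) d) label0
  -- one grouping pass: groups.setdefault(i, []).append(m)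
  let groups : PySem.Dict Int (List String) :=
    label.items.foldl (fun g p => g.modify p.2 [] (fun l => l ++ [p.1])) PySem.Dict.empty
  (PySem.List.enumerate accounts).foldl (fun res p =>
    if groups.contains p.1 then
      res ++ [PySem.List.pyGetD p.2 0 "" :: PySem.List.sorted (groups.getD p.1 []) (fun x => x) false]
    else res) []

-- ===== PRECONDITION & SPEC =====
-- Pre_ excludes inputs containing an empty account list (no name slot): A raises IndexError there.
def Pre_merge_account (accounts : List (List String)) : Prop := ∀ acc ∈ accounts, acc ≠ []
instance (accounts : List (List String)) : Decidable (Pre_merge_account accounts) := by unfold Pre_merge_account; infer_instance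

def pvWitness_merge_account : List (List String) :=
  [["john", "j@a.com", "j@b.com"], ["mary", "m@a.com"], ["john", "j@b.com", "j@c.com"]]

-- A raises IndexError on any input containing an empty account list; B returns the merge of
-- the remaining accounts (an empty account simply contributes nothing).
def Raises_merge_account (accounts : List (List String)) : Prop := [] ∈ accounts
instance (accounts : List (List String)) : Decidable (Raises_merge_account accounts) := by unfold Raises_merge_account; infer_instance
def pvRaiseWitness_merge_account : List (List String) := [["ann", "a@x.com"], []]
def pvRaiseWitnessOut_merge_account : List (List String) := [["ann", "a@x.com"]]

def Spec_merge_account (accounts : List (List String)) (out : List (List String)) : Prop := out = merge_account_alt accounts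
instance (accounts : List (List String)) (out : List (List String)) : Decidable (Spec_merge_account accounts out) := by unfold Spec_merge_account; infer_instance

-- ===== CLAIM (what is proved, stated in full; the proofs are below) =====
def Claim_equal_merge_account : Prop := ∀ (accounts : List (List String)), Dom_merge_account accounts → Pre_merge_account accounts → Spec_merge_account accounts (merge_account accounts)
def Claim_raises_merge_account : Prop := (∀ (accounts : List (List String)), Dom_merge_account accounts → Raises_merge_account accounts → ¬ Pre_merge_account accounts) ∧ (Dom_merge_account (pvRaiseWitness_merge_account) ∧ Raises_merge_account (pvRaiseWitness_merge_account) ∧ merge_account_alt (pvRaiseWitness_merge_account) = pvRaiseWitnessOut_merge_account)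

-- ===== LEMMAS AND PROOFS =====

theorem pvFoldCongr {β α : Type} (P : β → Prop) (l : List α) (fA fB : β → α → β)
    (hpres : ∀ d x, P d → P (fA d x)) (heq : ∀ d x, P d → fA d x = fB d x) :
    ∀ d, P d → l.foldl fA d = l.foldl fB d ∧ P (l.foldl fA d) := by
  induction l with
  | nil => exact fun d hd => ⟨rfl, hd⟩
  | cons x xs ih =>
    intro d hd
    simp only [List.foldl_cons]
    exact ⟨((ih (fA d x) (hpres d x hd)).1).trans (by rw [heq d x hd]), (ih (fA d x) (hpres d x hd)).2⟩

theorem pvFoldPres {β α : Type} (P : β → Prop) (l : List α) (f : β → α → β)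
    (hpres : ∀ d x, P d → P (f d x)) (d : β) (hd : P d) : P (l.foldl f d) :=
  (pvFoldCongr P l f f hpres (fun _ _ _ => rfl) d hd).2

theorem pvInsertSelf {d : PySem.Dict String Int} {m : String} {v : Int}
    (hnd : d.keys.Nodup) (h : d.get? m = some v) : d.insert m v = d := by
  apply PySem.Dict.ext
  rw [PySem.Dict.items_insert_of_contains _ _ (by rw [PySem.Dict.contains_eq_isSome_get?, h]; rfl)]
  conv_rhs => rw [← List.map_id d.items]
  apply List.map_congr_left
  rintro ⟨a, b⟩ hp
  by_cases hk : a = m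
  · subst hk
    have hb : d.get? a = some b := PySem.Dict.get?_of_mem_items d hp hnd
    rw [hb] at h
    simp [Option.some.inj h]
  · simp [hk]

-- the Python step `mails[m] = min(mails.get(m, inf), i)` equals B's conditional insert
theorem pvStepEq (d : PySem.Dict String Int) (i : Int) (m : String) (hnd : d.keys.Nodup) :
    d.insert m (pvMin2 (d.get? m) i)
      = if !d.contains m || i < d.getD m 0 then d.insert m i else d := by
  rcases h : d.get? m with _ | v
  · have hc : d.contains m = false := by rw [PySem.Dict.contains_eq_isSome_get?, h]; rfl
    simp [pvMin2, hc]
  · have hc : d.contains m = true := by rw [PySem.Dict.contains_eq_isSome_get?, h]; rfl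
    have hg : d.getD m 0 = v := PySem.Dict.getD_of_get?_eq_some d 0 h
    by_cases hlt : i < v
    · simp [pvMin2, hc, hg, hlt, min_eq_right hlt.le]
    · simp [pvMin2, hc, hg, hlt, min_eq_left (not_lt.1 hlt), pvInsertSelf hnd h]

theorem pvInnerFold {α : Type} (acc : List String) (g : α → String → α) (init : α) :
    (PySem.List.pyRange 1 (acc.length : Int) 1).foldl (fun s j => g s (PySem.List.pyGetD acc j "")) init
      = acc.tail.foldl g init := by
  have h := PySem.List.map_pyGetD_pyRange acc "" (a := 1) (by norm_num)
  norm_num [List.drop_one] at h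
  conv_rhs => rw [← h, List.foldl_map]

theorem pvGetTail (xs : List (List String)) (i : Int) :
    PySem.List.pyGetD (xs.map (fun acc => PySem.List.slice acc (some 1) none)) i []
      = (PySem.List.pyGetD xs i []).tail := by
  simp only [PySem.List.slice_from_one]
  simpa using PySem.List.pyGetD_map (fun acc => acc.tail) xs i []

theorem pvPruneMap (l : List Int) (head : Int → String) (tail : Int → List String) :
    pvPrune (l.map (fun i => head i :: tail i))
      = (l.filter (fun i => !(tail i == []))).map
          (fun i => head i :: PySem.List.sorted (tail i) (fun x => x) false) := by
  induction l with
  | nil => rfl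
  | cons i l ih =>
    simp only [List.map_cons, List.filter_cons, pvPrune]
    rcases ht : tail i with _ | ⟨x, xs⟩
    · simpa [pvPrune, ht] using ih
    · rw [PySem.List.slice_to _ (by norm_num : (0:Int) ≤ 1)]
      simp [ht, ih, PySem.List.slice_from_one]

theorem pvGroupsGetD (L : List (String × Int)) (i : Int) :
    (L.foldl (fun g p => g.modify p.2 [] (fun l => l ++ [p.1])) PySem.Dict.empty).getD i []
      = (L.filter (fun p => p.2 == i)).map (fun p => p.1) := by
  have hswap : L.foldl (fun g p => g.modify p.2 [] (fun l => l ++ [p.1])) PySem.Dict.empty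
      = (L.map Prod.swap).foldl (fun g q => g.modify q.1 [] (fun l => l ++ [q.2])) PySem.Dict.empty := by
    rw [List.foldl_map]; rfl
  rw [hswap, PySem.Dict.getD_foldl_modify_append]
  simp [List.filter_map, Function.comp_def, Prod.swap]

theorem pvGroupsContains (L : List (String × Int)) (i : Int) :
    (L.foldl (fun g p => g.modify p.2 [] (fun l => l ++ [p.1])) PySem.Dict.empty).contains i
      = !((L.filter (fun p => p.2 == i)).map (fun p => p.1) == []) := by
  by_cases hc : ∃ p ∈ L, p.2 = i
  · have h1 : (L.filter (fun p => p.2 == i)) ≠ [] := by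
      obtain ⟨p, hp, he⟩ := hc
      exact List.ne_nil_of_mem (List.mem_filter.2 ⟨hp, by simp [he]⟩)
    have h2 : (L.foldl (fun g p => g.modify p.2 [] (fun l => l ++ [p.1])) PySem.Dict.empty).contains i = true := by
      rw [PySem.Dict.contains_iff_mem_keys,
        PySem.Dict.keys_foldl_modify_key L (fun p => p.2) [] (fun _ p => (fun l => l ++ [p.1])) PySem.Dict.empty]
      obtain ⟨p, hp, he⟩ := hc
      rw [PySem.Dict.keys_empty, PySem.Set.update_nil_left, PySem.Set.mem_ofList]
      exact List.mem_map.2 ⟨p, hp, by simp [he]⟩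
    simp [h2, h1]
  · push Not at hc
    have h1 : (L.filter (fun p => p.2 == i)) = [] :=
      List.filter_eq_nil_iff.2 (fun p hp => by simpa using hc p hp)
    have h2 : (L.foldl (fun g p => g.modify p.2 [] (fun l => l ++ [p.1])) PySem.Dict.empty).contains i = false := by
      rw [Bool.eq_false_iff]
      intro hco
      rw [PySem.Dict.contains_iff_mem_keys,
        PySem.Dict.keys_foldl_modify_key L (fun p => p.2) [] (fun _ p => (fun l => l ++ [p.1])) PySem.Dict.empty] at hco
      simp only [PySem.Dict.keys_empty, PySem.Set.update_nil_left, PySem.Set.mem_ofList, List.mem_map] at hco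
      obtain ⟨p, hp, he⟩ := hco
      exact absurd he (hc p hp)
    simp [h2, h1]

theorem pvNameGetD (accounts : List (List String)) (i : Int)
    (hi : i ∈ PySem.List.pyRange 0 (accounts.length : Int) 1) :
    ((PySem.List.pyRange 0 (accounts.length : Int) 1).foldl
        (fun nm j => nm.insert j (PySem.List.pyGetD (PySem.List.pyGetD accounts j []) 0 "")) PySem.Dict.empty).getD i ""
      = PySem.List.pyGetD (PySem.List.pyGetD accounts i []) 0 "" := by
  have hit := PySem.Dict.items_foldl_insert_fresh (PySem.List.pyRange 0 (accounts.length : Int) 1)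
    (fun j => j) (fun j => PySem.List.pyGetD (PySem.List.pyGetD accounts j []) 0 "") PySem.Dict.empty
    (fun a _ => PySem.Dict.contains_empty a) (by simpa using PySem.List.nodup_pyRange_one 0 (accounts.length : Int))
  have hnd : ((PySem.List.pyRange 0 (accounts.length : Int) 1).foldl
      (fun nm j => nm.insert j (PySem.List.pyGetD (PySem.List.pyGetD accounts j []) 0 "")) PySem.Dict.empty).keys.Nodup := by
    simp only [PySem.Dict.keys, hit]
    simpa [List.map_map, Function.comp_def] using PySem.List.nodup_pyRange_one 0 (accounts.length : Int)
  refine PySem.Dict.getD_of_mem_items _ ?_ hnd ""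
  rw [hit]
  exact List.mem_append_right _ (List.mem_map.2 ⟨i, hi, rfl⟩)

theorem pvPairFold {s1 s2 a : Type} (P : s1 -> Prop) (fA fB : s1 -> a -> s1) (g : s2 -> a -> s2)
    (hpres : forall d x, P d -> P (fB d x)) (heq : forall d x, P d -> fA d x = fB d x) :
    forall (l : List a) (d : s1) (b : s2), P d ->
      l.foldl (fun st x => (fA st.1 x, g st.2 x)) (d, b) = (l.foldl fB d, l.foldl g b) := by
  intro l
  induction l with
  | nil => intro d b _; rfl
  | cons x t ih =>
    intro d b hd
    simp only [List.foldl_cons]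
    rw [heq d x hd]
    exact ih (fB d x) (g b x) (hpres d x hd)

theorem pvInitBNodup (accounts : List (List String)) (y : Int) (x : PySem.Dict String Int)
    (hx : x.keys.Nodup) :
    (List.foldl (fun d m => if !d.contains m || y < d.getD m 0 then d.insert m y else d)
      x (PySem.List.pyGetD accounts y []).tail).keys.Nodup := by
  refine pvFoldPres (fun (d : PySem.Dict String Int) => d.keys.Nodup) _ _ ?_ x hx
  intro d m hd
  split
  · exact PySem.Dict.nodup_keys_insert _ _ _ hd
  · exact hd

theorem pvInitSplit (accounts : List (List String)) :
    List.foldl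
      (fun (st : PySem.Dict String Int × PySem.Dict Int String) (i : Int) =>
        (List.foldl (fun d j => d.insert (PySem.List.pyGetD (PySem.List.pyGetD accounts i []) j "")
            (pvMin2 (d.get? (PySem.List.pyGetD (PySem.List.pyGetD accounts i []) j "")) i))
          st.1 (PySem.List.pyRange 1 ((PySem.List.pyGetD accounts i []).length : Int) 1),
         st.2.insert i (PySem.List.pyGetD (PySem.List.pyGetD accounts i []) 0 "")))
      (PySem.Dict.empty, PySem.Dict.empty) (PySem.List.pyRange 0 (accounts.length : Int) 1)
    = (List.foldl (fun x y => List.foldl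
          (fun d m => if !d.contains m || y < d.getD m 0 then d.insert m y else d)
          x (PySem.List.pyGetD accounts y []).tail) PySem.Dict.empty (PySem.List.pyRange 0 (accounts.length : Int) 1),
       List.foldl (fun nm j => nm.insert j (PySem.List.pyGetD (PySem.List.pyGetD accounts j []) 0 ""))
         PySem.Dict.empty (PySem.List.pyRange 0 (accounts.length : Int) 1)) := by
  refine pvPairFold (fun d => d.keys.Nodup)
    (fun x (i : Int) => List.foldl (fun d j => d.insert (PySem.List.pyGetD (PySem.List.pyGetD accounts i []) j "")
      (pvMin2 (d.get? (PySem.List.pyGetD (PySem.List.pyGetD accounts i []) j "")) i))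
        x (PySem.List.pyRange 1 ((PySem.List.pyGetD accounts i []).length : Int) 1))
    (fun x (y : Int) => List.foldl (fun d m => if !d.contains m || y < d.getD m 0 then d.insert m y else d)
        x (PySem.List.pyGetD accounts y []).tail)
    (fun (nm : PySem.Dict Int String) (i : Int) => nm.insert i (PySem.List.pyGetD (PySem.List.pyGetD accounts i []) 0 ""))
    (fun d y hd => pvInitBNodup accounts y d hd) ?_ _ _ _ PySem.Dict.nodup_keys_empty
  intro d i hd
  dsimp only
  rw [pvInnerFold (PySem.List.pyGetD accounts i [])
    (fun d m => d.insert m (pvMin2 (d.get? m) i)) d]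
  exact (pvFoldCongr (fun d => d.keys.Nodup) _ _ _
    (fun d m hd => PySem.Dict.nodup_keys_insert _ _ _ hd)
    (fun d m hd => pvStepEq d i m hd) d hd).1

theorem pvRoundEq (accounts : List (List String)) (d0 : PySem.Dict String Int) :
    List.foldl (fun d (_ : Int) =>
      List.foldl (fun d (i : Int) =>
        List.foldl (fun d1 j => pvStore d1 (PySem.List.pyGetD (PySem.List.pyGetD accounts i []) j "")
            (List.foldl (fun t j => pvMinOpt (d.get? (PySem.List.pyGetD (PySem.List.pyGetD accounts i []) j "")) t)
              none (PySem.List.pyRange 1 ((PySem.List.pyGetD accounts i []).length : Int) 1)))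
          d (PySem.List.pyRange 1 ((PySem.List.pyGetD accounts i []).length : Int) 1))
        d (PySem.List.pyRange 0 (accounts.length : Int) 1)) d0 (PySem.List.pyRange 0 4 1)
    = List.foldl (fun d (_ : Int) =>
        List.foldl (fun x (y : Int) =>
          List.foldl (fun d m => pvStore d m
              (List.foldl (fun t m => pvMinOpt (x.get? m) t) none (PySem.List.pyGetD accounts y []).tail))
            x (PySem.List.pyGetD accounts y []).tail)
          d (PySem.List.pyRange 0 (accounts.length : Int) 1)) d0 (PySem.List.pyRange 0 4 1) := by
  have h : (fun (d : PySem.Dict String Int) (i : Int) =>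
      List.foldl (fun d1 j => pvStore d1 (PySem.List.pyGetD (PySem.List.pyGetD accounts i []) j "")
          (List.foldl (fun t j => pvMinOpt (d.get? (PySem.List.pyGetD (PySem.List.pyGetD accounts i []) j "")) t)
            none (PySem.List.pyRange 1 ((PySem.List.pyGetD accounts i []).length : Int) 1)))
        d (PySem.List.pyRange 1 ((PySem.List.pyGetD accounts i []).length : Int) 1))
      = (fun (x : PySem.Dict String Int) (y : Int) =>
          List.foldl (fun d m => pvStore d m
              (List.foldl (fun t m => pvMinOpt (x.get? m) t) none (PySem.List.pyGetD accounts y []).tail))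
            x (PySem.List.pyGetD accounts y []).tail) := by
    funext d i
    simp only [pvInnerFold (PySem.List.pyGetD accounts i []) (fun t m => pvMinOpt (d.get? m) t) (none : Option Int)]
    rw [pvInnerFold (PySem.List.pyGetD accounts i [])
      (fun d1 m => pvStore d1 m
        (List.foldl (fun t m => pvMinOpt (d.get? m) t) none (PySem.List.pyGetD accounts i []).tail)) d]
  rw [h]

theorem pvFinalEq (accounts : List (List String)) (D : PySem.Dict String Int) :
    pvPrune ((PySem.List.pyRange 0 (accounts.length : Int) 1).map (fun i =>
        (List.foldl (fun nm j => nm.insert j (PySem.List.pyGetD (PySem.List.pyGetD accounts j []) 0 ""))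
            PySem.Dict.empty (PySem.List.pyRange 0 (accounts.length : Int) 1)).getD i ""
          :: (D.items.filter (fun p => p.2 == i)).map (fun p => p.1)))
    = List.foldl (fun x y =>
        if (List.foldl (fun g p => g.modify p.2 [] (fun l => l ++ [p.1])) PySem.Dict.empty D.items).contains y = true
        then x ++ [PySem.List.pyGetD (PySem.List.pyGetD accounts y []) 0 "" ::
          PySem.List.sorted ((List.foldl (fun g p => g.modify p.2 [] (fun l => l ++ [p.1])) PySem.Dict.empty D.items).getD y [])
            (fun x => x) false]
        else x) [] (PySem.List.pyRange 0 (accounts.length : Int) 1) := by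
  rw [pvPruneMap (PySem.List.pyRange 0 (accounts.length : Int) 1)
    (fun i => (List.foldl (fun nm j => nm.insert j (PySem.List.pyGetD (PySem.List.pyGetD accounts j []) 0 ""))
        PySem.Dict.empty (PySem.List.pyRange 0 (accounts.length : Int) 1)).getD i "")
    (fun i => (D.items.filter (fun p => p.2 == i)).map (fun p => p.1))]
  rw [PySem.List.foldl_append_if
    (fun y => (List.foldl (fun (g : PySem.Dict Int (List String)) (p : String × Int) =>
        g.modify p.2 [] (fun l => l ++ [p.1])) PySem.Dict.empty D.items).contains y)
    (fun y => PySem.List.pyGetD (PySem.List.pyGetD accounts y []) 0 "" ::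
      PySem.List.sorted ((List.foldl (fun (g : PySem.Dict Int (List String)) (p : String × Int) =>
          g.modify p.2 [] (fun l => l ++ [p.1])) PySem.Dict.empty D.items).getD y [])
        (fun x => x) false)]
  simp only [List.nil_append]
  have hfil : (PySem.List.pyRange 0 (accounts.length : Int) 1).filter
      (fun y => (List.foldl (fun g p => g.modify p.2 [] (fun l => l ++ [p.1])) PySem.Dict.empty D.items).contains y)
      = (PySem.List.pyRange 0 (accounts.length : Int) 1).filter
        (fun i => !((D.items.filter (fun p => p.2 == i)).map (fun p => p.1) == [])) :=
    List.filter_congr (fun i _ => by rw [pvGroupsContains])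
  rw [hfil]
  apply List.map_congr_left
  intro i hi
  have hil := List.mem_of_mem_filter hi
  rw [pvGroupsGetD D.items i, pvNameGetD accounts i hil]

set_option maxHeartbeats 1000000 in
theorem pvPortsEq (accounts : List (List String)) : merge_account accounts = merge_account_alt accounts := by
  unfold merge_account merge_account_alt
  simp only [PySem.List.enumerate_eq_map_pyRange (d := ([] : List String)), List.foldl_map,
    PySem.List.len, List.length_map, pvGetTail]
  simp only [pvInitSplit accounts]
  simp only [pvRoundEq accounts]
  exact pvFinalEq accounts _

-- ===== VERDICT (by name: the statement is the Claim_ definition above) =====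
theorem merge_account_spec : Claim_equal_merge_account := by
  intro accounts _ _
  exact pvPortsEq accounts

def merge_account_raises : Claim_raises_merge_account := by
  unfold Claim_raises_merge_account
  refine ⟨fun accounts _ hr hp => hp [] hr rfl, by decide⟩
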